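-- pv_equiv track=rewrite | github.com/mijitrenkel/Modelling-and-Simulation | ca_lab3.py | split_into_groups
-- ===== SOURCE A (Python) =====
-- def split_into_groups(triangle):
--     N = len(triangle)
--     groups = []
--     for i in range(N):
--         left = triangle[(i - 1) % N]
--         middle = triangle[i]
--         right = triangle[(i + 1) % N]
--         group = [left, middle, right]
--         groups.append(group)
--     return groups
-- ===== SOURCE B (Python) =====
-- def split_into_groups(triangle):
--     lefts = triangle[-1:] + triangle[:-1]
--     rights = triangle[1:] + triangle[:1]
--     return [[l, m, r] for l, m, r in zip(lefts, triangle, rights)]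
-- ===== Notes on version B (the rewrite author's own statement) =====
-- stated objective: idiomatic
-- what changed: Replaces the index loop with per-element modular arithmetic by two precomputed rotated copies of the list zipped with the original in one parallel traversal.
import Mathlib
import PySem

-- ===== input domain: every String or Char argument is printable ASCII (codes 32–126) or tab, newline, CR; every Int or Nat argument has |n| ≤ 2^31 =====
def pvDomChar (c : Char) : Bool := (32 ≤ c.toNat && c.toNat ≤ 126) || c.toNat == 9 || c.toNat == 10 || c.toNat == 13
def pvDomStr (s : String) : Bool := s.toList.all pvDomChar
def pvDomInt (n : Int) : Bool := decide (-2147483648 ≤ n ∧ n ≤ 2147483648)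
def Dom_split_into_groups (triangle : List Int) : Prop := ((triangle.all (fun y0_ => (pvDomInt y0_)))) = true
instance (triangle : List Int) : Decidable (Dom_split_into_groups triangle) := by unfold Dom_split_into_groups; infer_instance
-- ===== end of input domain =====

-- B replaces A's per-index modular arithmetic by zipping two rotated copies of the list with the original (idiomatic; same cost).

-- ===== PORT A =====
-- literal port of A: loop over range(N) appending [t[(i-1)%N], t[i], t[(i+1)%N]].
-- Python indexing is exact here: every computed index lies in range (so pyGetD's
-- default 0 is never used), hence A never raises and no Pre_ is needed.
def split_into_groups (triangle : List Int) : List (List Int) :=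
  let N : Int := triangle.length
  (PySem.List.pyRange 0 N 1).foldl (fun groups i =>
    let left := PySem.List.pyGetD triangle (PySem.Int.mod (i - 1) N) 0
    let middle := PySem.List.pyGetD triangle i 0
    let right := PySem.List.pyGetD triangle (PySem.Int.mod (i + 1) N) 0
    groups ++ [[left, middle, right]]) []

-- ===== PORT B =====
-- literal port of Source B: lefts = triangle[-1:] + triangle[:-1], rights = triangle[1:] + triangle[:1],
-- then one zipped traversal collecting each triplet as a list
def split_into_groups_alt (triangle : List Int) : List (List Int) :=
  let lefts := PySem.List.slice triangle (some (-1)) none ++ PySem.List.slice triangle none (some (-1))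
  let rights := PySem.List.slice triangle (some 1) none ++ PySem.List.slice triangle none (some 1)
  (lefts.zip (triangle.zip rights)).map (fun p => [p.1, p.2.1, p.2.2])

-- ===== PRECONDITION & SPEC =====
def Spec_split_into_groups (triangle : List Int) (out : List (List Int)) : Prop := out = split_into_groups_alt triangle
instance (triangle : List Int) (out : List (List Int)) : Decidable (Spec_split_into_groups triangle out) := by unfold Spec_split_into_groups; infer_instance

-- ===== CLAIM (what is proved, stated in full; the proofs are below) =====
def Claim_equal_split_into_groups : Prop := ∀ (triangle : List Int), Dom_split_into_groups triangle → Spec_split_into_groups triangle (split_into_groups triangle)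

-- ===== LEMMAS AND PROOFS =====

-- the group A builds at loop index i
def pvGroup (t : List Int) (i : Int) : List Int :=
  [PySem.List.pyGetD t (PySem.Int.mod (i - 1) t.length) 0,
   PySem.List.pyGetD t i 0,
   PySem.List.pyGetD t (PySem.Int.mod (i + 1) t.length) 0]

-- A's loop is the map of pvGroup over range(N)
theorem pv_A_map (t : List Int) :
    split_into_groups t = (List.range t.length).map (fun k : Nat => pvGroup t k) := by
  simp only [split_into_groups]
  rw [PySem.List.pyRange_zero_natCast]
  show List.foldl (fun groups i => groups ++ [pvGroup t i]) []
      (List.map (fun k : Nat => (k : Int)) (List.range t.length))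
    = List.map (fun k : Nat => pvGroup t k) (List.range t.length)
  rw [PySem.List.foldl_append_singleton_eq_map (f := pvGroup t)]
  rw [List.nil_append, List.map_map]
  rfl

-- t[(k-1) % N] is the k-th element of the left-rotated copy
theorem pv_left_eq (t : List Int) (k : Nat) (hk : k < t.length) :
    PySem.List.pyGetD t (PySem.Int.mod ((k:Int) - 1) t.length) 0
      = (t.drop (t.length - 1) ++ t.dropLast)[k]'(by
          simp [List.length_dropLast]; omega) := by
  have hn : 0 < t.length := Nat.lt_of_le_of_lt (Nat.zero_le _) hk
  rw [PySem.Int.mod_eq_emod_of_pos (by exact_mod_cast hn)]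
  rcases Nat.eq_zero_or_pos k with h0 | hpos
  · subst h0
    have hm : ((0:Int) - 1) % (t.length : Int) = (t.length : Int) - 1 := by
      have h1 := Int.add_mul_emod_self_left (a := (0:Int) - 1) (b := (t.length:Int)) (c := 1)
      rw [← h1]
      have h2 : (0:Int) - 1 + (t.length:Int) * 1 = (t.length:Int) - 1 := by ring
      rw [h2]
      exact Int.emod_eq_of_lt (by omega) (by omega)
    rw [Nat.cast_zero, hm, PySem.List.pyGetD_eq_getElem _ _ (by omega) (by omega)]
    rw [List.getElem_append_left (by simp; omega)]
    rw [List.getElem_drop]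
    congr 1
    omega
  · have hm : ((k:Int) - 1) % (t.length : Int) = (k:Int) - 1 :=
      Int.emod_eq_of_lt (by omega) (by omega)
    rw [hm, PySem.List.pyGetD_eq_getElem _ _ (by omega) (by omega)]
    rw [List.getElem_append_right (by simp; omega)]
    rw [List.getElem_dropLast]
    congr 1
    simp
    omega

-- t[(k+1) % N] is the k-th element of the right-rotated copy
theorem pv_right_eq (t : List Int) (k : Nat) (hk : k < t.length) :
    PySem.List.pyGetD t (PySem.Int.mod ((k:Int) + 1) t.length) 0
      = (t.tail ++ t.take 1)[k]'(by simp [List.length_tail]; omega) := by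
  have hn : 0 < t.length := Nat.lt_of_le_of_lt (Nat.zero_le _) hk
  rw [PySem.Int.mod_eq_emod_of_pos (by exact_mod_cast hn)]
  rcases Nat.lt_or_ge k (t.length - 1) with hlt | hge
  · have hm : ((k:Int) + 1) % (t.length : Int) = (k:Int) + 1 :=
      Int.emod_eq_of_lt (by omega) (by omega)
    rw [hm, PySem.List.pyGetD_eq_getElem _ _ (by omega) (by omega)]
    rw [List.getElem_append_left (by simp [List.length_tail]; omega)]
    rw [List.getElem_tail]
    congr 1
  · have hk1 : k = t.length - 1 := by omega
    have hm : ((k:Int) + 1) % (t.length : Int) = 0 := by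
      have h2 : ((k:Int) + 1) = t.length := by omega
      rw [h2, Int.emod_self]
    rw [hm, PySem.List.pyGetD_eq_getElem _ _ (by omega) (by omega)]
    rw [List.getElem_append_right (by simp [List.length_tail]; omega)]
    simp [List.getElem_take, List.length_tail]
    congr 1
    omega

theorem pv_mid_eq (t : List Int) (k : Nat) (hk : k < t.length) :
    PySem.List.pyGetD t (k:Int) 0 = t[k] := by
  rw [PySem.List.pyGetD_eq_getElem _ _ (by omega) (by omega)]
  congr 1

theorem pv_main (t : List Int) : split_into_groups t = split_into_groups_alt t := by
  rw [pv_A_map]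
  simp only [split_into_groups_alt]
  rw [PySem.List.slice_from_neg_one, PySem.List.slice_to_neg_one,
      PySem.List.slice_from_one, PySem.List.slice_to _ (by norm_num)]
  apply List.ext_getElem
  · simp [List.length_tail, List.length_dropLast]
    omega
  · intro k h1 h2
    have hk : k < t.length := by simpa using h1
    simp only [List.getElem_map, List.getElem_range, List.getElem_zip, Int.toNat_one]
    simp only [pvGroup]
    rw [pv_left_eq t k hk, pv_right_eq t k hk, pv_mid_eq t k hk]

-- ===== VERDICT (by name: the statement is the Claim_ definition above) =====
theorem split_into_groups_spec : Claim_equal_split_into_groups := by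
  intro t _
  exact pv_main t
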